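-- pv_equiv track=rewrite | github.com/MinguKang98/Algorithm-test | CodingInterview/kakao/3_cache.py | cache1
-- ===== SOURCE A (Python) =====
-- from typing import List
-- from collections import deque
--
-- def cache1(cacheSize: int, cities: List[str]) -> int:
--     elapsed: int = 0
--     cache = deque(maxlen=cacheSize)
--
--     for c in cities:
--         c = c.lower()
--         if c in cache:
--             cache.remove(c)
--             cache.append(c)
--             elapsed += 1
--         else:
--             cache.append(c)
--             elapsed += 5
--     return elapsed
-- ===== SOURCE B (Python) =====
-- from typing import List
--
-- def cache1(cacheSize: int, cities: List[str]) -> int: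
--     # Stateless per-access view of LRU: the cache after some accesses holds exactly
--     # the first `cacheSize` distinct cities of the access history, newest first.
--     elapsed = 0
--     before = []  # previously accessed cities (lowercased), oldest first
--     for city in cities:
--         c = city.lower()
--         window = set()
--         for p in reversed(before):
--             if len(window) == cacheSize:
--                 break
--             window.add(p)
--         elapsed += 1 if c in window else 5
--         before.append(c)
--     return elapsed
-- ===== Notes on version B (the rewrite author's own statement) =====
-- stated objective: alternative
-- what changed: B maintains no LRU cache state: using the fact that the cache contents after some accesses are exactly the first cacheSize distinct cities of the reversed access history, it rebuilds that window (as a set) per access, instead of A's deque with membership/remove/append/eviction.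
import Mathlib
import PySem

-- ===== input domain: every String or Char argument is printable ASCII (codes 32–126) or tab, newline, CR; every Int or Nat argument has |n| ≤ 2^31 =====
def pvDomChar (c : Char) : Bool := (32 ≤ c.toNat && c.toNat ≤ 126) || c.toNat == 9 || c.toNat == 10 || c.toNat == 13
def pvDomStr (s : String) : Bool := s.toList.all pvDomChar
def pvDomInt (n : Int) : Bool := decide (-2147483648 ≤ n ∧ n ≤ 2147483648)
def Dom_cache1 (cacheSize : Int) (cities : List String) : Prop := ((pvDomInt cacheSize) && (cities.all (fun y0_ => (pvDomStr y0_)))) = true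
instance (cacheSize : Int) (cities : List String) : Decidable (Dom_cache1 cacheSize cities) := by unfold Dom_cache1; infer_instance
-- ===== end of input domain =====

-- B recomputes the LRU cache window per access from the history instead of maintaining A's deque state (objective: alternative; same O(n*k) class, larger constant).

-- ===== PORT A =====
-- deque(maxlen=cacheSize): append drops the front element when the deque is full (exact for cacheSize ≥ 0; Pre_ excludes cacheSize < 0, where Python raises ValueError at construction)
def cache1 (cacheSize : Int) (cities : List String) : Int :=
  (cities.foldl (fun (st : Int × List String) city =>
      let c := PySem.Str.lower city
      if c ∈ st.2 then
        (st.1 + 1, st.2.erase c ++ [c])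
      else
        let cache' := st.2 ++ [c]
        (st.1 + 5, if (cache'.length : Int) > cacheSize then cache'.drop 1 else cache')
    ) (0, [])).1

-- ===== PORT B =====
-- inner loop of Source B: fill `window` (a Python set) from the reversed history, stopping at cacheSize distinct cities
def altLoop (k : Int) (window : PySem.Set String) : List String → PySem.Set String
  | [] => window
  | p :: ps =>
    if (window.length : Int) = k then window
    else altLoop k (PySem.Set.add window p) ps

def cache1_alt (cacheSize : Int) (cities : List String) : Int :=
  (cities.foldl (fun (st : Int × List String) city =>
      let c := PySem.Str.lower city
      let window := altLoop cacheSize PySem.Set.empty st.2.reverse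
      (st.1 + (if c ∈ window then 1 else 5), st.2 ++ [c])
    ) (0, [])).1

-- ===== PRECONDITION & SPEC =====
-- Pre_ excludes negative cacheSize, where Python A raises ValueError (deque maxlen must be non-negative)
def Pre_cache1 (cacheSize : Int) (cities : List String) : Prop := 0 ≤ cacheSize
instance (cacheSize : Int) (cities : List String) : Decidable (Pre_cache1 cacheSize cities) := by unfold Pre_cache1; infer_instance
def pvWitness_cache1 : Int × List String := (2, ["Seoul", "seoul", "Busan"])

def Spec_cache1 (cacheSize : Int) (cities : List String) (out : Int) : Prop := out = cache1_alt cacheSize cities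
instance (cacheSize : Int) (cities : List String) (out : Int) : Decidable (Spec_cache1 cacheSize cities out) := by unfold Spec_cache1; infer_instance

-- ===== CLAIM (what is proved, stated in full; the proofs are below) =====
def Claim_equal_cache1 : Prop := ∀ (cacheSize : Int) (cities : List String), Dom_cache1 cacheSize cities → Pre_cache1 cacheSize cities → Spec_cache1 cacheSize cities (cache1 cacheSize cities)
-- ===== LEMMAS AND PROOFS =====

-- spec of B's inner loop: the first k distinct elements of a list
def fd (k : Int) : List String → List String
  | [] => []
  | p :: ps => if k = 0 then [] else p :: fd (k - 1) (ps.filter (fun q => decide (q ≠ p)))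
termination_by l => l.length
decreasing_by simp; exact (List.length_filter_le _ _).trans (by simp)

theorem fd_nil (k : Int) : fd k [] = [] := by rw [fd.eq_def]

theorem fd_cons (k : Int) (p : String) (ps : List String) :
    fd k (p :: ps) = if k = 0 then [] else p :: fd (k - 1) (ps.filter (fun q => decide (q ≠ p))) := by
  rw [fd.eq_def]

theorem fd_zero (l : List String) : fd 0 l = [] := by
  cases l with
  | nil => exact fd_nil 0
  | cons p ps => rw [fd_cons]; simp

-- induction principle following fd's recursion
theorem fd_rec (motive : Int → List String → Prop)
    (h1 : ∀ k, motive k [])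
    (h2 : ∀ (k : Int) (p : String) (ps : List String),
        motive (k-1) (ps.filter (fun q => decide (q ≠ p))) → motive k (p :: ps)) :
    ∀ (k : Int) (l : List String), motive k l := by
  suffices h : ∀ (n : Nat) (k : Int) (l : List String), l.length ≤ n → motive k l by
    intro k l; exact h l.length k l le_rfl
  intro n
  induction n with
  | zero => intro k l hl; rw [List.length_eq_zero_iff.mp (Nat.le_zero.mp hl)]; exact h1 k
  | succ n ih =>
    intro k l hl
    cases l with
    | nil => exact h1 k
    | cons p ps =>
      exact h2 k p ps (ih _ _ (le_trans (List.length_filter_le _ _) (Nat.le_of_succ_le_succ hl)))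

theorem altLoop_eq (k : Int) : ∀ (l acc : List String),
    altLoop k acc l = acc ++ fd (k - acc.length) (l.filter (fun p => decide (p ∉ acc))) := by
  intro l
  induction l with
  | nil => intro acc; simp [altLoop, fd_nil]
  | cons p ps ih =>
    intro acc
    by_cases h1 : (acc.length : Int) = k
    · simp [altLoop, h1, fd_zero]
    · by_cases h2 : p ∈ acc
      · simp [altLoop, h1, ih, h2, PySem.Set.add]
      · have hadd : PySem.Set.add acc p = acc ++ [p] := by simp [PySem.Set.add, h2]
        have hk : k - (acc.length : Int) ≠ 0 := by omega
        simp only [altLoop, if_neg h1, hadd, ih (acc ++ [p])]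
        rw [List.filter_cons_of_pos (by simpa using h2)]
        rw [fd_cons]
        simp only [if_neg hk]
        have hfil : (ps.filter (fun p_1 => decide (p_1 ∉ acc))).filter (fun q => decide (q ≠ p))
            = ps.filter (fun q => decide (q ∉ acc ++ [p])) := by
          rw [List.filter_filter]
          apply List.filter_congr
          intro a _
          simp [List.mem_append, not_or, and_comm]
        rw [hfil]
        simp only [List.length_append, List.length_singleton]
        have harith : k - ((acc.length : Int) + 1) = k - acc.length - 1 := by omega
        push_cast
        rw [harith]
        simp [List.append_assoc]

theorem altLoop_nil_eq_fd (k : Int) (l : List String) : altLoop k PySem.Set.empty l = fd k l := by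
  rw [show (PySem.Set.empty : PySem.Set String) = [] from rfl, altLoop_eq]
  simp

theorem mem_fd (x : String) : ∀ (k : Int) (l : List String), x ∈ fd k l → x ∈ l := by
  intro k l
  induction k, l using fd_rec with
  | h1 k => simp [fd_nil]
  | h2 k p ps ih =>
    rw [fd_cons]
    split
    · simp
    · intro h
      rcases List.mem_cons.mp h with h | h
      · simp [h]
      · exact List.mem_cons_of_mem _ (List.mem_of_mem_filter (ih h))

theorem nodup_fd : ∀ (k : Int) (l : List String), (fd k l).Nodup := by
  intro k l
  induction k, l using fd_rec with
  | h1 k => simp [fd_nil]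
  | h2 k p ps ih =>
    rw [fd_cons]
    split
    · simp
    · refine List.nodup_cons.mpr ⟨fun h => ?_, ih⟩
      have := mem_fd p _ _ h
      simp at this

theorem len_fd_le : ∀ (k : Int) (l : List String), 0 ≤ k → ((fd k l).length : Int) ≤ k := by
  intro k l
  induction k, l using fd_rec with
  | h1 k => intro hk; simpa [fd_nil] using hk
  | h2 k p ps ih =>
    intro hk
    rw [fd_cons]
    split
    · simpa using hk
    · rename_i h0
      have := ih (by omega)
      simp only [List.length_cons]
      push_cast
      omega

theorem fd_filter_of_mem (c : String) : ∀ (k : Int) (l : List String),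
    c ∈ fd k l → fd (k - 1) (l.filter (fun q => decide (q ≠ c))) = (fd k l).filter (fun q => decide (q ≠ c)) := by
  intro k l
  induction k, l using fd_rec with
  | h1 k => simp [fd_nil]
  | h2 k p ps ih =>
    intro hc
    by_cases h0 : k = 0
    · rw [h0, fd_zero] at hc; simp at hc
    · rw [fd_cons, if_neg h0] at hc ⊢
      by_cases hcp : c = p
      · subst hcp
        rw [List.filter_cons_of_neg (by simp)]
        rw [List.filter_cons_of_neg (by simp)]
        have hall : (fd (k - 1) (ps.filter (fun q => decide (q ≠ c)))).filter (fun q => decide (q ≠ c))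
            = fd (k - 1) (ps.filter (fun q => decide (q ≠ c))) := by
          apply List.filter_eq_self.mpr
          intro a ha
          have := mem_fd a _ _ ha
          simp only [List.mem_filter, decide_eq_true_eq] at this
          simp [this.2]
        rw [hall]
      · have hcr : c ∈ fd (k - 1) (ps.filter (fun q => decide (q ≠ p))) := by
          rcases List.mem_cons.mp hc with h | h
          · exact absurd h hcp
          · exact h
        have h1 : k - 1 ≠ 0 := by
          intro h
          rw [h, fd_zero] at hcr; simp at hcr
        rw [List.filter_cons_of_pos (by simpa using Ne.symm hcp)]
        rw [List.filter_cons_of_pos (by simpa using Ne.symm hcp)]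
        rw [fd_cons, if_neg h1]
        congr 1
        have hcomm : (ps.filter (fun q => decide (q ≠ c))).filter (fun q => decide (q ≠ p))
            = (ps.filter (fun q => decide (q ≠ p))).filter (fun q => decide (q ≠ c)) := by
          rw [List.filter_filter, List.filter_filter]
          apply List.filter_congr
          intro a _
          rw [Bool.and_comm]
        rw [hcomm, ih hcr]

theorem fd_filter_miss (c : String) : ∀ (k : Int) (l : List String), 0 ≤ k → k ≠ 0 →
    c ∉ fd k l →
    fd (k - 1) (l.filter (fun q => decide (q ≠ c)))
      = if ((fd k l).length : Int) = k then (fd k l).dropLast else fd k l := by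
  intro k l
  induction k, l using fd_rec with
  | h1 k => intro hk h0 _; simp [fd_nil, Ne.symm h0]
  | h2 k p ps ih =>
    intro hk h0 hc
    rw [fd_cons, if_neg h0] at hc
    have hcp : c ≠ p := by rintro rfl; exact hc (List.mem_cons_self ..)
    have hcr : c ∉ fd (k - 1) (ps.filter (fun q => decide (q ≠ p))) :=
      fun h => hc (List.mem_cons_of_mem p h)
    rw [List.filter_cons_of_pos (by simpa using Ne.symm hcp)]
    by_cases h1 : k = 1
    · subst h1
      have e1 : (1:Int) - 1 = 0 := by norm_num
      rw [e1, fd_zero, fd_cons, if_neg one_ne_zero, e1, fd_zero]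
      simp
    · rw [fd_cons, if_neg (by omega)]
      have hcomm : (ps.filter (fun q => decide (q ≠ c))).filter (fun q => decide (q ≠ p))
          = (ps.filter (fun q => decide (q ≠ p))).filter (fun q => decide (q ≠ c)) := by
        rw [List.filter_filter, List.filter_filter]
        apply List.filter_congr
        intro a _
        rw [Bool.and_comm]
      rw [hcomm, ih (by omega) (by omega) hcr]
      rw [fd_cons, if_neg h0]
      set R := fd (k - 1) (ps.filter (fun q => decide (q ≠ p))) with hR
      by_cases hlen : (R.length : Int) = k - 1
      · rw [if_pos hlen, if_pos (by simp; omega)]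
        have hRne : R ≠ [] := by
          intro h
          rw [h] at hlen
          simp at hlen
          omega
        rw [List.dropLast_cons_of_ne_nil hRne]
      · rw [if_neg hlen, if_neg (by simp; omega)]

-- one synchronized step, stated on the reversed-cache invariant, then folded
theorem loop_eq (k : Int) (hk : 0 ≤ k) : ∀ (cities : List String) (e : Int) (before : List String),
    (cities.foldl (fun (st : Int × List String) city =>
        let c := PySem.Str.lower city
        if c ∈ st.2 then
          (st.1 + 1, st.2.erase c ++ [c])
        else
          let cache' := st.2 ++ [c]
          (st.1 + 5, if (cache'.length : Int) > k then cache'.drop 1 else cache')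
      ) (e, (fd k before.reverse).reverse)).1
    = (cities.foldl (fun (st : Int × List String) city =>
        let c := PySem.Str.lower city
        let window := altLoop k PySem.Set.empty st.2.reverse
        (st.1 + (if c ∈ window then 1 else 5), st.2 ++ [c])
      ) (e, before)).1 := by
  intro cities
  induction cities with
  | nil => intro e before; rfl
  | cons city rest ih =>
    intro e before
    simp only [List.foldl_cons]
    rw [altLoop_nil_eq_fd]
    set c := PySem.Str.lower city with hc
    have hrev : (before ++ [c]).reverse = c :: before.reverse := by simp
    set R := fd k before.reverse with hR
    by_cases hm : c ∈ R
    · rw [if_pos (by simpa using hm), if_pos hm]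
      have hk0 : k ≠ 0 := by
        intro h; rw [h, fd_zero] at hR; rw [hR] at hm; simp at hm
      have hnew : fd k (c :: before.reverse) = c :: R.filter (fun q => decide (q ≠ c)) := by
        rw [fd_cons, if_neg hk0, fd_filter_of_mem c k before.reverse hm]
      have hcache : R.reverse.erase c ++ [c] = (fd k ((before ++ [c]).reverse)).reverse := by
        rw [hrev, hnew]
        rw [List.Nodup.erase_eq_filter (List.nodup_reverse.mpr (nodup_fd k before.reverse))]
        simp only [List.filter_reverse, List.reverse_cons]
        congr 2
        apply List.filter_congr
        intro a _
        by_cases h : a = c <;> simp [h]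
      rw [hcache, ih]
    · rw [if_neg (by simpa using hm), if_neg hm]
      have hcache : (if ((R.reverse ++ [c]).length : Int) > k
            then (R.reverse ++ [c]).drop 1 else R.reverse ++ [c])
          = (fd k ((before ++ [c]).reverse)).reverse := by
        rw [hrev]
        by_cases hk0 : k = 0
        · subst hk0
          have : R = [] := by rw [hR, fd_zero]
          rw [this, fd_zero]
          simp
        · rw [fd_cons, if_neg hk0, fd_filter_miss c k before.reverse hk hk0 hm, ← hR]
          have hle : (R.length : Int) ≤ k := hR ▸ len_fd_le k before.reverse hk
          by_cases hlen : (R.length : Int) = k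
          · rw [if_pos (by simp; omega), if_pos hlen]
            have hRne : R.reverse ≠ [] := by
              intro h
              have : R = [] := by simpa using h
              rw [this] at hlen; simp at hlen; omega
            rw [List.drop_one, List.reverse_cons, List.tail_append_of_ne_nil hRne]
            congr 1
            exact List.tail_reverse
          · rw [if_neg (by simp; omega), if_neg hlen]
            simp
      rw [hcache, ih]

-- ===== VERDICT (by name: the statement is the Claim_ definition above) =====
theorem cache1_spec : Claim_equal_cache1 := by
  intro cacheSize cities _ hpre
  unfold Spec_cache1 cache1 cache1_alt
  have := loop_eq cacheSize hpre cities 0 []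
  simp only [List.reverse_nil, fd_nil] at this
  simpa using this
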